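-- pv_equiv track=rewrite | github.com/GraceHanJiarui/Companion-AI | paper_interface_gap_analysis.py | parse_projector_profile
-- ===== SOURCE A (Python) =====
-- def parse_projector_profile(experiment_mode: str) -> str:
--     for suffix in [
--         "fitlinear",
--         "fitpoly2",
--         "fitmlp_h4",
--         "fitmlp_h8",
--         "fitmlp_h12",
--         "v3a",
--         "v3b",
--         "legacy",
--         "balanced",
--         "conservative",
--         "sparse",
--     ]:
--         if experiment_mode.endswith(f"_p{suffix}"):
--             return suffix
--     return "legacy"
-- ===== SOURCE B (Python) =====
-- KNOWN_PROFILES = frozenset({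
--     "fitlinear", "fitpoly2", "fitmlp_h4", "fitmlp_h8", "fitmlp_h12",
--     "v3a", "v3b", "legacy", "balanced", "conservative", "sparse",
-- })
--
--
-- def parse_projector_profile(experiment_mode: str) -> str:
--     _head, sep, tail = experiment_mode.rpartition("_p")
--     if sep and tail in KNOWN_PROFILES:
--         return tail
--     return "legacy"
-- ===== Notes on version B (the rewrite author's own statement) =====
-- stated objective: simpler
-- what changed: Replaces the 11-way endswith scan by a single rpartition at the profile separator that splits off the candidate tail once, followed by one frozenset membership test.
import Mathlib
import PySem

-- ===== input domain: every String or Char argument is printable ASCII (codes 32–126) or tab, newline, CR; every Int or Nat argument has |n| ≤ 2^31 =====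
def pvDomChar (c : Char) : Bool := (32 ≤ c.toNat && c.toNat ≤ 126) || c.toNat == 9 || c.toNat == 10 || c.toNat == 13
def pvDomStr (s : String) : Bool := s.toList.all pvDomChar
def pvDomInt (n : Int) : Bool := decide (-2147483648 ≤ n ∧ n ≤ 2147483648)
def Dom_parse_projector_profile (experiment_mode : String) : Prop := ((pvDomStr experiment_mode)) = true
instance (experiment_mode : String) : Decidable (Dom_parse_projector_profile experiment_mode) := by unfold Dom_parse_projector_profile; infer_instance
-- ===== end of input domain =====

-- B replaces A's 11-way endswith scan by one rpartition("_p") plus a single set-membership test (objective: simpler).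

-- ===== PORT A =====
-- the literal suffix list of A's for-loop, in A's order
def pvSuffixes : List String :=
  ["fitlinear", "fitpoly2", "fitmlp_h4", "fitmlp_h8", "fitmlp_h12",
   "v3a", "v3b", "legacy", "balanced", "conservative", "sparse"]

-- A's for-loop: return the first suffix with experiment_mode.endswith("_p" + suffix), else "legacy"
def pvLoopA (m : String) : List String → String
  | [] => "legacy"
  | s :: rest => if PySem.Str.endswith m ("_p" ++ s) then s else pvLoopA m rest

def parse_projector_profile (experiment_mode : String) : String :=
  pvLoopA experiment_mode pvSuffixes

-- ===== PORT B =====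
-- hand port of str.rpartition(sep) for the two-char separator "_p" (PySem has no rpartition):
-- returns (head, tail) around the LAST occurrence of '_','p', or none when "_p" does not occur.
-- Exact: the recursion prefers an occurrence found in the tail (a later position) over one at index 0.
def pvRPartP : List Char → Option (List Char × List Char)
  | [] => none
  | c :: rest =>
    match pvRPartP rest with
    | some (h, t) => some (c :: h, t)
    | none => if c = '_' ∧ rest.head? = some 'p' then some ([], rest.drop 1) else none

-- B's KNOWN_PROFILES frozenset (its own literal, as in Source B)
def pvKnown : PySem.Set String :=
  PySem.Set.ofList
    ["fitlinear", "fitpoly2", "fitmlp_h4", "fitmlp_h8", "fitmlp_h12",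
     "v3a", "v3b", "legacy", "balanced", "conservative", "sparse"]

def parse_projector_profile_alt (experiment_mode : String) : String :=
  match pvRPartP experiment_mode.toList with
  | none => "legacy"   -- sep == "" : "_p" absent
  | some (_, t) =>
    let tail := String.ofList t
    if PySem.Set.contains pvKnown tail then tail else "legacy"

-- ===== PRECONDITION & SPEC =====
def Spec_parse_projector_profile (experiment_mode : String) (out : String) : Prop := out = parse_projector_profile_alt experiment_mode
instance (experiment_mode : String) (out : String) : Decidable (Spec_parse_projector_profile experiment_mode out) := by unfold Spec_parse_projector_profile; infer_instance

-- ===== CLAIM (what is proved, stated in full; the proofs are below) =====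
def Claim_equal_parse_projector_profile : Prop := ∀ (experiment_mode : String), Dom_parse_projector_profile experiment_mode → Spec_parse_projector_profile experiment_mode (parse_projector_profile experiment_mode)

-- ===== LEMMAS AND PROOFS =====

-- pvRPartP l = none means "_p" occurs nowhere in l
lemma pvRPartP_none {l : List Char} (h : pvRPartP l = none) :
    ∀ a b : List Char, l ≠ a ++ '_' :: 'p' :: b := by
  induction l with
  | nil => intro a b hab; cases a <;> simp at hab
  | cons c rest ih =>
    intro a b hab
    simp only [pvRPartP] at h
    rcases hr : pvRPartP rest with _ | p
    · rw [hr] at h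
      simp only at h
      split_ifs at h with hc
      cases a with
      | nil =>
        simp at hab
        exact hc ⟨hab.1, by simp [hab.2]⟩
      | cons x a' =>
        simp at hab
        exact ih hr a' b hab.2
    · rw [hr] at h; rcases p with ⟨h1, t1⟩; simp at h

-- pvRPartP l = some (h, t) means l = h ++ "_p" ++ t and "_p" does not occur in t
lemma pvRPartP_some {l h t : List Char} (hs : pvRPartP l = some (h, t)) :
    l = h ++ '_' :: 'p' :: t ∧ pvRPartP t = none := by
  induction l generalizing h with
  | nil => simp [pvRPartP] at hs
  | cons c rest ih =>
    simp only [pvRPartP] at hs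
    rcases hr : pvRPartP rest with _ | ⟨h', t'⟩
    · rw [hr] at hs
      simp only at hs
      split_ifs at hs with hc
      · obtain ⟨hc1, hc2⟩ := hc
        rcases rest with _ | ⟨r, rest'⟩
        · simp at hc2
        · simp at hc2 hs
          obtain ⟨hh, ht⟩ := hs
          subst hh ht hc1 hc2
          refine ⟨by simp, ?_⟩
          rcases hx : pvRPartP rest' with _ | ⟨h2, t2⟩
          · rfl
          · simp [pvRPartP, hx] at hr
    · rw [hr] at hs
      simp at hs
      obtain ⟨hh, ht⟩ := hs
      subst ht
      obtain ⟨hl, hn⟩ := ih hr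
      exact ⟨by rw [← hh]; simp [hl], hn⟩

-- key matching lemma: when "_p" occurs neither in t (the rpartition tail) nor in s,
-- m ends with "_p"+s exactly when t = s.toList
lemma pv_endswith_iff {m : String} {hd t : List Char} {s : String}
    (hl : m.toList = hd ++ '_' :: 'p' :: t) (hn : pvRPartP t = none)
    (hns : pvRPartP s.toList = none) :
    PySem.Str.endswith m ("_p" ++ s) = true ↔ t = s.toList := by
  constructor
  · intro he
    rw [PySem.Str.endswith_eq, PySem.Chars.endswith_iff] at he
    have he' : '_' :: 'p' :: s.toList <:+ m.toList := by simpa using he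
    have ht' : '_' :: 'p' :: t <:+ m.toList := ⟨hd, hl.symm⟩
    rcases List.suffix_or_suffix_of_suffix he' ht' with hsub | hsub
    · obtain ⟨a, ha⟩ := hsub
      rcases a with _ | ⟨x, a2⟩
      · simpa using ha.symm
      · rcases a2 with _ | ⟨y, a3⟩
        · simp at ha
        · simp at ha
          exact absurd ha.2.2.symm (pvRPartP_none hn a3 s.toList)
    · obtain ⟨a, ha⟩ := hsub
      rcases a with _ | ⟨x, a2⟩
      · simpa using ha
      · rcases a2 with _ | ⟨y, a3⟩
        · simp at ha
        · simp at ha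
          exact absurd ha.2.2.symm (pvRPartP_none hns a3 t)
  · intro ht
    subst ht
    rw [PySem.Str.endswith_eq, PySem.Chars.endswith_iff]
    exact ⟨hd, by simpa using hl.symm⟩

-- given the rpartition decomposition of m, A's loop is a membership test on the tail
lemma pvLoopA_spec {m : String} {hd t : List Char}
    (hl : m.toList = hd ++ '_' :: 'p' :: t) (hn : pvRPartP t = none) :
    ∀ ss : List String, (∀ s ∈ ss, pvRPartP s.toList = none) →
      pvLoopA m ss = if (ss.map String.toList).contains t then String.ofList t else "legacy" := by
  intro ss hss
  induction ss with
  | nil => simp [pvLoopA]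
  | cons s rest ih =>
    have hns : pvRPartP s.toList = none := hss s (by simp)
    by_cases heq : t = s.toList
    · have he : PySem.Str.endswith m ("_p" ++ s) = true :=
        (pv_endswith_iff hl hn hns).mpr heq
      simp only [pvLoopA, he]
      simp [heq, String.ofList_toList]
    · have he : PySem.Str.endswith m ("_p" ++ s) = false := by
        rcases hb : PySem.Str.endswith m ("_p" ++ s) with _ | _
        · rfl
        · exact absurd ((pv_endswith_iff hl hn hns).mp hb) heq
      have ihr := ih (fun x hx => hss x (by simp [hx]))
      have hne : (t == s.toList) = false := by simpa using heq
      simp only [pvLoopA, he, Bool.false_eq_true, if_false, ihr, List.map_cons,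
        List.contains_cons, hne, Bool.false_or]

-- B's set membership on the rebuilt string agrees with list membership of the char list
lemma pv_contains_bridge (t : List Char) (ss : List String) :
    PySem.Set.contains (PySem.Set.ofList ss) (String.ofList t) = (ss.map String.toList).contains t := by
  rcases hb : (ss.map String.toList).contains t with _ | _
  · simp only [List.contains_eq_mem, decide_eq_false_iff_not, List.mem_map] at hb
    rcases hc : PySem.Set.contains (PySem.Set.ofList ss) (String.ofList t) with _ | _
    · rfl
    · rw [PySem.Set.contains_iff, PySem.Set.mem_ofList] at hc
      exact absurd ⟨String.ofList t, hc, by simp⟩ hb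
  · simp only [List.contains_eq_mem, decide_eq_true_eq, List.mem_map] at hb
    obtain ⟨s, hs, rfl⟩ := hb
    rw [PySem.Set.contains_iff, PySem.Set.mem_ofList, String.ofList_toList]
    exact hs

-- ===== VERDICT (by name: the statement is the Claim_ definition above) =====
theorem parse_projector_profile_spec : Claim_equal_parse_projector_profile := by
  intro m _
  unfold Spec_parse_projector_profile parse_projector_profile parse_projector_profile_alt
  rcases hr : pvRPartP m.toList with _ | ⟨hd, t⟩
  · -- "_p" absent: every endswith test in A's loop is false, both sides give "legacy"
    have hne : ∀ s : List Char, PySem.Chars.endswith m.toList ('_' :: 'p' :: s) = false := by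
      intro s
      rcases hb : PySem.Chars.endswith m.toList ('_' :: 'p' :: s) with _ | _
      · rfl
      · rw [PySem.Chars.endswith_iff] at hb
        obtain ⟨a, ha⟩ := hb
        exact absurd ha.symm (pvRPartP_none hr a s)
    simp [pvSuffixes, pvLoopA, hne]
  · obtain ⟨hl, hn⟩ := pvRPartP_some hr
    rw [pvLoopA_spec hl hn pvSuffixes (by decide)]
    simp only [pvKnown, pv_contains_bridge]
    rw [show (["fitlinear", "fitpoly2", "fitmlp_h4", "fitmlp_h8", "fitmlp_h12",
      "v3a", "v3b", "legacy", "balanced", "conservative", "sparse"] : List String) = pvSuffixes from rfl]
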